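-- pv_equiv track=rewrite | github.com/ehborisov/algorithms | 9.Strings/boyer_moore_pattern_matching.py | prepare_full_shift_list
-- ===== SOURCE A (Python) =====
-- from typing import List
--
-- def find_prefixes(input_string: str) -> List[int]:
--     """
--     prepare a list of prefixes for an input string, output will be a list of the same length as the input string
--     containing for every index i position a length of common prefix for substring [i, n] with an entire original
--     string.
--     :param input_string: string to prepare list of prefixes for
--     :return:
--     """
--     prefixes_list = [0] * len(input_string)
--     for i in range(len(input_string)):
--         k = i
--         j = 0
--         while k < len(input_string):
--             if input_string[k] != input_string[j]:
--                 break
--             prefixes_list[i] += 1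
--             j += 1
--             k += 1
--     return prefixes_list
--
-- def prepare_full_shift_list(pattern: str) -> List[int]:
--     """
--     Computes a list of l(x) values.
--     :param pattern:
--     :return:
--     """
--     full_shift_list = [0] * len(pattern)
--     left_to_right_prefixes = find_prefixes(pattern)
--     reversed_prefixes = list(reversed(left_to_right_prefixes))
--     longest = 0
--     for i in range(len(reversed_prefixes)):
--         if reversed_prefixes[i] == i + 1:
--             longest = max(reversed_prefixes[i], longest)
--         full_shift_list[-i - 1] = longest
--     return full_shift_list
-- ===== SOURCE B (Python) =====
-- def prepare_full_shift_list(pattern):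
--     # Direct border test: out[-i-1] is the longest border (suffix == prefix)
--     # of length <= i+1; no intermediate prefix array.
--     n = len(pattern)
--     out = []
--     best = 0
--     for i in range(n):
--         if pattern[:i + 1] == pattern[n - 1 - i:]:
--             best = i + 1
--         out.append(best)
--     out.reverse()
--     return out
-- ===== Notes on version B (the rewrite author's own statement) =====
-- stated objective: simpler
-- what changed: Replaces A's two-phase construction (quadratic per-index character-by-character prefix-match array, reverse it, then a rewrite pass with negative indexing) by one loop that directly tests whether the length-(i+1) prefix equals the length-(i+1) suffix (a border) and keeps a running maximum, building the output back-to-front.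
import Mathlib
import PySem

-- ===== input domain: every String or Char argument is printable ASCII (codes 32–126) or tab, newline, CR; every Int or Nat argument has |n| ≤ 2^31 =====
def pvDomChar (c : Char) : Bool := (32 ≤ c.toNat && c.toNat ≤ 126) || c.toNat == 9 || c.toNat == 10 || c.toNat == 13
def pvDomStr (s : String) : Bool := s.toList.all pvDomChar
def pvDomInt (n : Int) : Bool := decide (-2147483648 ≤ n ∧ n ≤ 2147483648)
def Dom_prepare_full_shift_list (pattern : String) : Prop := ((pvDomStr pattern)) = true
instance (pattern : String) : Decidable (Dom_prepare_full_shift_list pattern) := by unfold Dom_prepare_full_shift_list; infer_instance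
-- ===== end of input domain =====

-- B replaces A's O(n^2) prefix-array pass by direct border tests (prefix-slice = suffix-slice)
-- with one running maximum: simpler (no intermediate array, one loop), same worst-case cost.


-- ===== PORT A =====
-- inner `while k < len(s): if s[k] != s[j]: break; pl[i] += 1; j += 1; k += 1`
-- (in A's calls j ≤ k always holds, so s[j]/s[k] are in range; getD is exact there)
def pvAInner (s : List Char) (pl : List Int) (i k j : Nat) : List Int :=
  if _h : k < s.length then
    if s.getD k default ≠ s.getD j default then pl
    else pvAInner s (pl.set i (pl.getD i 0 + 1)) i (k + 1) (j + 1)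
  else pl
termination_by s.length - k

def find_prefixes (input_string : String) : List Int :=
  (List.range input_string.toList.length).foldl
    (fun pl i => pvAInner input_string.toList pl i i 0)
    (List.replicate input_string.toList.length 0)

def prepare_full_shift_list (pattern : String) : List Int :=
  let n := pattern.toList.length
  let reversed_prefixes := (find_prefixes pattern).reverse
  -- Python writes full_shift_list[-i-1]; since 0 ≤ i < n this is index n-1-i
  ((List.range reversed_prefixes.length).foldl
    (fun (st : List Int × Int) i =>
      let longest := if reversed_prefixes.getD i 0 = (i : Int) + 1
        then max (reversed_prefixes.getD i 0) st.2 else st.2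
      (st.1.set (n - 1 - i) longest, longest))
    (List.replicate n 0, 0)).1

-- ===== PORT B =====
def prepare_full_shift_list_alt (pattern : String) : List Int :=
  let s := pattern.toList
  let n := s.length
  (((List.range n).foldl
    (fun (st : List Int × Int) i =>
      let best := if s.take (i + 1) = s.drop (n - 1 - i) then ((i : Int) + 1) else st.2
      (st.1 ++ [best], best))
    ([], 0)).1).reverse

-- ===== PRECONDITION & SPEC =====
def Spec_prepare_full_shift_list (pattern : String) (out : List Int) : Prop := out = prepare_full_shift_list_alt pattern
instance (pattern : String) (out : List Int) : Decidable (Spec_prepare_full_shift_list pattern out) := by unfold Spec_prepare_full_shift_list; infer_instance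

-- ===== CLAIM (what is proved, stated in full; the proofs are below) =====
def Claim_equal_prepare_full_shift_list : Prop := ∀ (pattern : String), Dom_prepare_full_shift_list pattern → Spec_prepare_full_shift_list pattern (prepare_full_shift_list pattern)

-- ===== LEMMAS AND PROOFS =====

/-- length of the longest common prefix of two char lists -/
def lcpN : List Char → List Char → Nat
  | a :: as, b :: bs => if a = b then lcpN as bs + 1 else 0
  | _, _ => 0

lemma set_getD_self (pl : List Int) (i : Nat) : pl.set i (pl.getD i 0) = pl := by
  by_cases h : i < pl.length
  · rw [List.getD_eq_getElem?_getD, List.getElem?_eq_getElem h]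
    simp [List.set_getElem_self h]
  · exact List.set_eq_of_length_le (le_of_not_gt h)

lemma pvAInner_spec (s : List Char) (i : Nat) : ∀ (pl : List Int) (k j : Nat), j ≤ k →
    pvAInner s pl i k j = pl.set i (pl.getD i 0 + (lcpN (s.drop k) (s.drop j) : Int)) := by
  intro pl k j
  induction pl, k, j using pvAInner.induct s i with
  | case1 pl k j hk hne =>
    intro hjk
    have hj : j < s.length := lt_of_le_of_lt hjk hk
    rw [pvAInner, dif_pos hk, if_pos hne,
      List.drop_eq_getElem_cons hk, List.drop_eq_getElem_cons hj]
    rw [List.getD_eq_getElem s default hk, List.getD_eq_getElem s default hj] at hne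
    rw [show lcpN (s[k] :: s.drop (k+1)) (s[j] :: s.drop (j+1)) = 0 by
      simp [lcpN, hne], Nat.cast_zero, add_zero, set_getD_self]
  | case2 pl k j hk heq ih =>
    intro hjk
    have hj : j < s.length := lt_of_le_of_lt hjk hk
    have hc : s[k] = s[j] := by
      have hgk : s.getD k default = s[k] := by
        rw [List.getD_eq_getElem?_getD, List.getElem?_eq_getElem hk]; rfl
      have hgj : s.getD j default = s[j] := by
        rw [List.getD_eq_getElem?_getD, List.getElem?_eq_getElem hj]; rfl
      rw [hgk, hgj] at heq
      exact not_not.mp heq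
    have hlcp : lcpN (s.drop k) (s.drop j)
        = lcpN (s.drop (k+1)) (s.drop (j+1)) + 1 := by
      rw [List.drop_eq_getElem_cons hk, List.drop_eq_getElem_cons hj]
      simp [lcpN, hc]
    rw [pvAInner, dif_pos hk, if_neg heq, ih (by omega), hlcp]
    by_cases hl : i < pl.length
    · have h1 : (pl.set i (pl.getD i 0 + 1)).getD i 0 = pl.getD i 0 + 1 := by
        rw [List.getD_eq_getElem?_getD, List.getElem?_set_self hl]; rfl
      rw [h1, List.set_set]
      congr 1
      push_cast
      ring
    · have hle := le_of_not_gt hl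
      rw [List.set_eq_of_length_le hle, List.set_eq_of_length_le hle,
        List.set_eq_of_length_le hle]
  | case3 pl k j hk =>
    intro _
    rw [pvAInner, dif_neg hk,
      show s.drop k = [] from List.drop_eq_nil_of_le (le_of_not_gt hk),
      show lcpN [] (s.drop j) = 0 from rfl, Nat.cast_zero, add_zero, set_getD_self]

lemma find_aux (s : List Char) : ∀ m, m ≤ s.length →
    ((List.range m).foldl (fun pl i => pvAInner s pl i i 0)
        (List.replicate s.length 0)).length = s.length ∧
    ∀ q, ((List.range m).foldl (fun pl i => pvAInner s pl i i 0)
        (List.replicate s.length 0)).getD q 0 =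
      if q < m then (lcpN (s.drop q) s : Int) else 0 := by
  intro m
  induction m with
  | zero =>
    intro _
    simp only [List.range_zero, List.foldl_nil]
    refine ⟨by simp, ?_⟩
    intro q
    rw [if_neg (Nat.not_lt_zero q), List.getD_eq_getElem?_getD,
      List.getElem?_replicate]
    split_ifs <;> rfl
  | succ m ih =>
    intro hm
    obtain ⟨hlen, hgd⟩ := ih (by omega)
    rw [List.range_succ, List.foldl_append]
    simp only [List.foldl_cons, List.foldl_nil]
    set P := (List.range m).foldl (fun pl i => pvAInner s pl i i 0)
      (List.replicate s.length 0) with hP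
    rw [pvAInner_spec s m P m 0 (Nat.zero_le m)]
    have hP0 : P.getD m 0 = 0 := by rw [hgd m]; simp
    constructor
    · simpa using hlen
    · intro q
      rw [List.getD_eq_getElem?_getD, List.getElem?_set]
      by_cases hqm : m = q
      · subst hqm
        rw [if_pos rfl, if_pos (by omega : m < m + 1), if_pos (by omega : m < P.length),
          hP0]
        simp
      · rw [if_neg hqm, ← List.getD_eq_getElem?_getD, hgd q]
        split_ifs <;> first | rfl | omega

lemma find_prefixes_spec (p : String) :
    (find_prefixes p).length = p.toList.length ∧
    ∀ q, (find_prefixes p).getD q 0 =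
      if q < p.toList.length then (lcpN (p.toList.drop q) p.toList : Int) else 0 :=
  find_aux p.toList p.toList.length le_rfl

lemma lcpN_eq_length_iff (xs ys : List Char) : lcpN xs ys = xs.length ↔ xs <+: ys := by
  induction xs generalizing ys with
  | nil => simp [lcpN]
  | cons a as ih =>
    cases ys with
    | nil => simp [lcpN]
    | cons b bs =>
      by_cases h : a = b
      · subst h
        simp [lcpN, ih bs]
      · simp [lcpN, h, List.cons_prefix_cons]

-- the two fold bodies, named for the invariant lemma
def stepA (rev : List Int) (n : Nat) (st : List Int × Int) (i : Nat) : List Int × Int :=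
  (st.1.set (n - 1 - i)
      (if rev.getD i 0 = (i : Int) + 1 then max (rev.getD i 0) st.2 else st.2),
    if rev.getD i 0 = (i : Int) + 1 then max (rev.getD i 0) st.2 else st.2)

def stepB (s : List Char) (n : Nat) (st : List Int × Int) (i : Nat) : List Int × Int :=
  (st.1 ++ [if s.take (i + 1) = s.drop (n - 1 - i) then ((i : Int) + 1) else st.2],
    if s.take (i + 1) = s.drop (n - 1 - i) then ((i : Int) + 1) else st.2)

lemma loop_inv (s : List Char) (rev : List Int)
    (hcond : ∀ i, i < s.length →
      ((rev.getD i 0 = (i : Int) + 1) ↔ s.take (i + 1) = s.drop (s.length - 1 - i))) :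
    ∀ m, m ≤ s.length →
    (let A := (List.range m).foldl (stepA rev s.length) (List.replicate s.length 0, 0)
     let B := (List.range m).foldl (stepB s s.length) ([], 0)
     A.2 = B.2 ∧ 0 ≤ B.2 ∧ B.2 ≤ (m : Int) ∧
     A.1.length = s.length ∧ B.1.length = m ∧
     ∀ q, q < s.length →
       A.1.getD q 0 = if s.length - m ≤ q then B.1.getD (s.length - 1 - q) 0 else 0) := by
  intro m
  induction m with
  | zero =>
    intro _
    refine ⟨rfl, le_rfl, le_rfl, by simp, rfl, ?_⟩
    intro q hq
    show (List.replicate s.length (0 : Int)).getD q 0 = _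
    rw [if_neg (by omega), List.getD_eq_getElem?_getD, List.getElem?_replicate,
      if_pos hq]
    rfl
  | succ m ih =>
    intro hm
    obtain ⟨h2, hnn, hub, hAlen, hBlen, hgd⟩ := ih (by omega)
    simp only [List.range_succ, List.foldl_append, List.foldl_cons, List.foldl_nil]
    set A := (List.range m).foldl (stepA rev s.length) (List.replicate s.length 0, 0)
      with hA
    set B := (List.range m).foldl (stepB s s.length) ([], 0) with hB
    have hmlt : m < s.length := by omega
    -- the two new "longest"/"best" values agree
    have hL : (stepA rev s.length A m).2 = (stepB s s.length B m).2 := by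
      simp only [stepA, stepB]
      by_cases hc : rev.getD m 0 = (m : Int) + 1
      · rw [if_pos hc, if_pos ((hcond m hmlt).mp hc), hc, h2]
        exact max_eq_left (by omega)
      · rw [if_neg hc, if_neg (fun h => hc ((hcond m hmlt).mpr h)), h2]
    have hLub : (stepB s s.length B m).2 ≤ (m : Int) + 1 := by
      simp only [stepB]
      split_ifs <;> omega
    have hLnn : 0 ≤ (stepB s s.length B m).2 := by
      simp only [stepB]
      split_ifs <;> omega
    refine ⟨hL, hLnn, by exact_mod_cast hLub, ?_, ?_, ?_⟩
    · simp [stepA, hAlen]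
    · simp [stepB, hBlen]
    · intro q hq
      have hA1 : (stepA rev s.length A m).1
          = A.1.set (s.length - 1 - m) (stepA rev s.length A m).2 := rfl
      have hB1 : (stepB s s.length B m).1 = B.1 ++ [(stepB s s.length B m).2] := rfl
      rw [hA1, hB1, List.getD_eq_getElem?_getD, List.getElem?_set]
      by_cases hqi : s.length - 1 - m = q
      · rw [if_pos hqi, if_pos (by omega : s.length - 1 - m < A.1.length),
          if_pos (by omega : s.length - (m + 1) ≤ q),
          show s.length - 1 - q = m by omega,
          List.getD_eq_getElem?_getD,
          List.getElem?_append_right (by omega : B.1.length ≤ m), hBlen,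
          Nat.sub_self]
        simp [hL]
      · rw [if_neg hqi, ← List.getD_eq_getElem?_getD, hgd q hq]
        by_cases hge : s.length - m ≤ q
        · rw [if_pos hge, if_pos (by omega : s.length - (m + 1) ≤ q)]
          have hlt : s.length - 1 - q < B.1.length := by omega
          rw [List.getD_eq_getElem?_getD, List.getD_eq_getElem?_getD,
            List.getElem?_append_left hlt]
        · rw [if_neg hge, if_neg (by omega : ¬ s.length - (m + 1) ≤ q)]

lemma main_eq (p : String) : prepare_full_shift_list p = prepare_full_shift_list_alt p := by
  obtain ⟨hflen, hfgd⟩ := find_prefixes_spec p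
  have hrevlen : ((find_prefixes p).reverse).length = p.toList.length := by
    simpa using hflen
  have hAdef : prepare_full_shift_list p =
      ((List.range p.toList.length).foldl
        (stepA ((find_prefixes p).reverse) p.toList.length)
        (List.replicate p.toList.length 0, 0)).1 := by
    simp only [prepare_full_shift_list]
    rw [hrevlen]
    rfl
  have hBdef : prepare_full_shift_list_alt p =
      (((List.range p.toList.length).foldl (stepB p.toList p.toList.length)
        ([], 0)).1).reverse := by
    simp only [prepare_full_shift_list_alt]
    rfl
  rw [hAdef, hBdef]
  set s := p.toList with hs
  set n := s.length with hn
  have hrevgd : ∀ i, i < n →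
      ((find_prefixes p).reverse).getD i 0 = (lcpN (s.drop (n - 1 - i)) s : Int) := by
    intro i hi
    rw [List.getD_eq_getElem?_getD, List.getElem?_reverse (by omega), hflen,
      ← List.getD_eq_getElem?_getD, hfgd (n - 1 - i), if_pos (by omega)]
  have hcond : ∀ i, i < n →
      ((((find_prefixes p).reverse).getD i 0 = (i : Int) + 1) ↔
        s.take (i + 1) = s.drop (n - 1 - i)) := by
    intro i hi
    rw [hrevgd i hi]
    have hdlen : (s.drop (n - 1 - i)).length = i + 1 := by
      rw [List.length_drop]; omega
    constructor
    · intro h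
      have hnat : lcpN (s.drop (n - 1 - i)) s = i + 1 := by exact_mod_cast h
      have hpre : s.drop (n - 1 - i) <+: s :=
        (lcpN_eq_length_iff _ _).mp (by omega)
      have := List.prefix_iff_eq_take.mp hpre
      rw [hdlen] at this
      exact this.symm
    · intro h
      have hpre : s.drop (n - 1 - i) <+: s := by
        rw [List.prefix_iff_eq_take, hdlen]
        exact h.symm
      have h2 := (lcpN_eq_length_iff (s.drop (n - 1 - i)) s).mpr hpre
      rw [hdlen] at h2
      exact_mod_cast congrArg (Nat.cast : Nat → Int) h2
  obtain ⟨_, _, _, hAlen, hBlen, hgd⟩ :=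
    loop_inv s ((find_prefixes p).reverse) hcond n le_rfl
  set A := (List.range n).foldl (stepA ((find_prefixes p).reverse) n)
    (List.replicate n 0, 0) with hA
  set B := (List.range n).foldl (stepB s n) ([], 0) with hB
  apply List.ext_getElem?
  intro q
  by_cases hq : q < n
  · have hqA : q < A.1.length := by omega
    have hqR : q < B.1.reverse.length := by rw [List.length_reverse, hBlen]; exact hq
    rw [List.getElem?_eq_getElem hqA, List.getElem?_eq_getElem hqR]
    congr 1
    rw [← List.getD_eq_getElem A.1 0 hqA, ← List.getD_eq_getElem B.1.reverse 0 hqR]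
    have h2 : B.1.reverse.getD q 0 = B.1.getD (n - 1 - q) 0 := by
      rw [List.getD_eq_getElem?_getD, List.getElem?_reverse (by rw [hBlen]; exact hq),
        hBlen, ← List.getD_eq_getElem?_getD]
    rw [h2, hgd q hq, if_pos (by omega)]
  · rw [List.getElem?_eq_none (by omega : A.1.length ≤ q),
      List.getElem?_eq_none (by rw [List.length_reverse, hBlen]; omega)]

-- ===== VERDICT (by name: the statement is the Claim_ definition above) =====
theorem prepare_full_shift_list_spec : Claim_equal_prepare_full_shift_list := by
  intro p _
  unfold Spec_prepare_full_shift_list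
  exact main_eq p
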